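-- pv_equiv track=rewrite | github.com/Abinayanafaiq/BotDating | bot.py | validate_region_input
-- ===== SOURCE A (Python) =====
-- from typing import Dict, Any, Optional
--
-- VALID_REGIONS = [
--     "Aceh", "Sumatera Utara", "Sumatera Barat", "Riau", "Jambi", "Sumatera Selatan",
--     "Bengkulu", "Lampung", "Kepulauan Bangka Belitung", "Kepulauan Riau", "Jakarta",
--     "Jawa Barat", "Jawa Tengah", "Yogyakarta", "Jawa Timur", "Banten", "Bali",
--     "Nusa Tenggara Barat", "Nusa Tenggara Timur", "Kalimantan Barat", "Kalimantan Tengah",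
--     "Kalimantan Selatan", "Kalimantan Timur", "Kalimantan Utara", "Sulawesi Utara",
--     "Sulawesi Tengah", "Sulawesi Selatan", "Sulawesi Tenggara", "Gorontalo",
--     "Sulawesi Barat", "Maluku", "Maluku Utara", "Papua", "Papua Barat", "Papua Tengah",
--     "Papua Pegunungan", "Papua Selatan", "Papua Barat Daya"
-- ]
--
-- def validate_region_input(text: str) -> Optional[str]:
--     # try to match by title-casing, allow exact matches ignoring case
--     candidate = text.strip()
--     for r in VALID_REGIONS:
--         if candidate.lower() == r.lower():
--             return r
--     # try simple fuzzy match: startswith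
--     candidate2 = candidate.lower()
--     for r in VALID_REGIONS:
--         if r.lower().startswith(candidate2) or candidate2 in r.lower():
--             return r
--     return None
-- ===== SOURCE B (Python) =====
-- from typing import Optional
--
-- VALID_REGIONS = [
--     "Aceh", "Sumatera Utara", "Sumatera Barat", "Riau", "Jambi", "Sumatera Selatan",
--     "Bengkulu", "Lampung", "Kepulauan Bangka Belitung", "Kepulauan Riau", "Jakarta",
--     "Jawa Barat", "Jawa Tengah", "Yogyakarta", "Jawa Timur", "Banten", "Bali",
--     "Nusa Tenggara Barat", "Nusa Tenggara Timur", "Kalimantan Barat", "Kalimantan Tengah",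
--     "Kalimantan Selatan", "Kalimantan Timur", "Kalimantan Utara", "Sulawesi Utara",
--     "Sulawesi Tengah", "Sulawesi Selatan", "Sulawesi Tenggara", "Gorontalo",
--     "Sulawesi Barat", "Maluku", "Maluku Utara", "Papua", "Papua Barat", "Papua Tengah",
--     "Papua Pegunungan", "Papua Selatan", "Papua Barat Daya"
-- ]
--
-- def validate_region_input(text: str) -> Optional[str]:
--     # single pass over VALID_REGIONS: track the first exact and the first fuzzy
--     # match, resolve exact-over-fuzzy priority after the loop
--     cand = text.strip().lower()
--     exact = None
--     fuzzy = None
--     for r in VALID_REGIONS: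
--         rl = r.lower()
--         if exact is None and cand == rl:
--             exact = r
--         if fuzzy is None and (rl.startswith(cand) or cand in rl):
--             fuzzy = r
--     return exact if exact is not None else fuzzy
-- ===== Notes on version B (the rewrite author's own statement) =====
-- stated objective: alternative
-- what changed: Fuses A's two scans of VALID_REGIONS into one pass that lowercases each region once and tracks the first exact and first fuzzy match, resolving exact-over-fuzzy priority after the loop.
import Mathlib
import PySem

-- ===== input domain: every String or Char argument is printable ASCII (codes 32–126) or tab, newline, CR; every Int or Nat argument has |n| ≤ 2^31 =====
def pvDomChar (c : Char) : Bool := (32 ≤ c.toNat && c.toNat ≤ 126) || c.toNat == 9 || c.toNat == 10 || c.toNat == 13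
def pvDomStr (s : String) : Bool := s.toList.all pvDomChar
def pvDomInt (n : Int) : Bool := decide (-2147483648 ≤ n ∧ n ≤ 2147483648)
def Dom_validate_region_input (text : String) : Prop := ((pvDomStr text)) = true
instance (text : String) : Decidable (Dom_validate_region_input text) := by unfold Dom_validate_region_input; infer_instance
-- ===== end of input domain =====

-- B fuses A's two scans of VALID_REGIONS into one pass that tracks the first exact
-- and first fuzzy match and resolves exact-over-fuzzy priority after the loop.

def VALID_REGIONS : List String := [
  "Aceh", "Sumatera Utara", "Sumatera Barat", "Riau", "Jambi", "Sumatera Selatan",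
  "Bengkulu", "Lampung", "Kepulauan Bangka Belitung", "Kepulauan Riau", "Jakarta",
  "Jawa Barat", "Jawa Tengah", "Yogyakarta", "Jawa Timur", "Banten", "Bali",
  "Nusa Tenggara Barat", "Nusa Tenggara Timur", "Kalimantan Barat", "Kalimantan Tengah",
  "Kalimantan Selatan", "Kalimantan Timur", "Kalimantan Utara", "Sulawesi Utara",
  "Sulawesi Tengah", "Sulawesi Selatan", "Sulawesi Tenggara", "Gorontalo",
  "Sulawesi Barat", "Maluku", "Maluku Utara", "Papua", "Papua Barat", "Papua Tengah",
  "Papua Pegunungan", "Papua Selatan", "Papua Barat Daya"]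

-- ===== PORT A =====
-- first loop: exact match ignoring case (c = candidate.lower())
def vriExactLoop (c : List Char) : List String → Option String
  | [] => none
  | r :: rs => if c == PySem.Chars.lower r.toList then some r else vriExactLoop c rs

-- second loop: fuzzy match (startswith or substring)
def vriFuzzyLoop (c : List Char) : List String → Option String
  | [] => none
  | r :: rs =>
      if PySem.Chars.startswith (PySem.Chars.lower r.toList) c
         || PySem.Chars.isIn c (PySem.Chars.lower r.toList) then some r
      else vriFuzzyLoop c rs

def validate_region_input (text : String) : Option String :=
  let candidate := PySem.Chars.strip text.toList
  match vriExactLoop (PySem.Chars.lower candidate) VALID_REGIONS with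
  | some r => some r
  | none =>
      let candidate2 := PySem.Chars.lower candidate
      vriFuzzyLoop candidate2 VALID_REGIONS

-- ===== PORT B =====
-- one fold step: fill exact/fuzzy slots the first time each condition fires
def vriStep (c : List Char) (acc : Option String × Option String) (r : String) :
    Option String × Option String :=
  let rl := PySem.Chars.lower r.toList
  let e := if acc.1.isNone && (c == rl) then some r else acc.1
  let f := if acc.2.isNone && (PySem.Chars.startswith rl c || PySem.Chars.isIn c rl)
           then some r else acc.2
  (e, f)

def validate_region_input_alt (text : String) : Option String :=
  let cand := PySem.Chars.lower (PySem.Chars.strip text.toList)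
  let acc := VALID_REGIONS.foldl (vriStep cand) (none, none)
  match acc.1 with
  | some e => some e
  | none => acc.2

-- ===== PRECONDITION & SPEC =====
def Spec_validate_region_input (text : String) (out : Option String) : Prop := out = validate_region_input_alt text
instance (text : String) (out : Option String) : Decidable (Spec_validate_region_input text out) := by unfold Spec_validate_region_input; infer_instance

-- ===== CLAIM (what is proved, stated in full; the proofs are below) =====
def Claim_equal_validate_region_input : Prop := ∀ (text : String), Dom_validate_region_input text → Spec_validate_region_input text (validate_region_input text)

-- ===== LEMMAS AND PROOFS =====

-- the fold fills each slot with the first match of its loop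
lemma vriStep_foldl (c : List Char) (regs : List String) (e f : Option String) :
    regs.foldl (vriStep c) (e, f) =
      ((e.or (vriExactLoop c regs)), (f.or (vriFuzzyLoop c regs))) := by
  induction regs generalizing e f with
  | nil => simp [vriExactLoop, vriFuzzyLoop]
  | cons r rs ih =>
      simp only [List.foldl, vriStep, vriExactLoop, vriFuzzyLoop]
      cases e <;> cases f <;> split_ifs <;> simp_all

set_option maxRecDepth 8192 in
theorem validate_region_input_eq (text : String) :
    validate_region_input text = validate_region_input_alt text := by
  show (match vriExactLoop (PySem.Chars.lower (PySem.Chars.strip text.toList)) VALID_REGIONS with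
        | some r => some r
        | none => vriFuzzyLoop (PySem.Chars.lower (PySem.Chars.strip text.toList)) VALID_REGIONS) =
       (match (VALID_REGIONS.foldl (vriStep (PySem.Chars.lower (PySem.Chars.strip text.toList))) (none, none)).1 with
        | some e => some e
        | none => (VALID_REGIONS.foldl (vriStep (PySem.Chars.lower (PySem.Chars.strip text.toList))) (none, none)).2)
  rw [vriStep_foldl]
  simp only [Option.none_or]

-- ===== VERDICT (by name: the statement is the Claim_ definition above) =====
theorem validate_region_input_spec : Claim_equal_validate_region_input := by
  intro text _
  exact validate_region_input_eq text
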